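-- pv_equiv track=rewrite | github.com/renzocastro91/Python-Informatorio2022 | Funciones/Ej17.py | conversor_a_numero
-- ===== SOURCE A (Python) =====
-- def conversor_a_numero(valor):
-- 	rango1 = ["A", "B", "C", "D", "E", "F"]
-- 	rango2 = ["10", "11", "12", "13", "14", "15"]
-- 	valor_real = ""
--
-- 	if (valor in rango1):
-- 		indice = rango1.index(valor)
-- 		for i in rango2:
-- 			if (indice == rango2.index(i)):
-- 				valor_real = i
-- 				break
--
-- 	return valor_real
-- ===== SOURCE B (Python) =====
-- def conversor_a_numero(valor):
-- 	if valor in ["A", "B", "C", "D", "E", "F"]: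
-- 		return str(ord(valor) - 55)
-- 	return ""
-- ===== Notes on version B (the rewrite author's own statement) =====
-- stated objective: simpler
-- what changed: Replaces the index-then-inner-scan over two parallel lists with a single membership guard and the closed-form arithmetic conversion str(ord(valor)-55).
import Mathlib
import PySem

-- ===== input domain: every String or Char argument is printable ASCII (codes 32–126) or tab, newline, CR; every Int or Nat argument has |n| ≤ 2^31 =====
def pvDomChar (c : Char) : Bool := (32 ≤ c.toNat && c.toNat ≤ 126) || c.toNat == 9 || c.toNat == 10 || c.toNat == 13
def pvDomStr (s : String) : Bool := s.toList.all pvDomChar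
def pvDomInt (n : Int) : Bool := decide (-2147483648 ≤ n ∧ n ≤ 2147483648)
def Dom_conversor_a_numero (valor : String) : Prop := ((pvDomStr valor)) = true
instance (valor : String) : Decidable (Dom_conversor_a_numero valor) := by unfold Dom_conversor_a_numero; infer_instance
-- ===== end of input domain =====

-- B replaces A's index-and-scan over two parallel lists with a guarded closed-form conversion (simpler).

-- ===== PORT A =====
-- the 'for i in rango2: if indice == rango2.index(i): valor_real = i; break' loop
def pvALoop (full : List String) (indice : Option Nat) : List String → String → String
  | [], acc => acc
  | i :: rest, acc =>
      if indice = PySem.List.index? full i then i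
      else pvALoop full indice rest acc

def conversor_a_numero (valor : String) : String :=
  let rango1 : List String := ["A", "B", "C", "D", "E", "F"]
  let rango2 : List String := ["10", "11", "12", "13", "14", "15"]
  let valor_real := ""
  if rango1.contains valor then
    let indice := PySem.List.index? rango1 valor
    pvALoop rango2 indice rango2 valor_real
  else valor_real

-- ===== PORT B =====
def conversor_a_numero_alt (valor : String) : String :=
  if (["A", "B", "C", "D", "E", "F"] : List String).contains valor then
    -- str(ord(valor) - 55); the guard ensures valor is a single character
    PySem.Int.toStr (((valor.toList.headD ' ').toNat : Int) - 55)
  else ""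

-- ===== PRECONDITION & SPEC =====
def Spec_conversor_a_numero (valor : String) (out : String) : Prop := out = conversor_a_numero_alt valor
instance (valor : String) (out : String) : Decidable (Spec_conversor_a_numero valor out) := by unfold Spec_conversor_a_numero; infer_instance

-- ===== CLAIM (what is proved, stated in full; the proofs are below) =====
def Claim_equal_conversor_a_numero : Prop := ∀ (valor : String), Dom_conversor_a_numero valor → Spec_conversor_a_numero valor (conversor_a_numero valor)

-- ===== LEMMAS AND PROOFS =====

-- ===== VERDICT (by name: the statement is the Claim_ definition above) =====
theorem conversor_a_numero_spec : Claim_equal_conversor_a_numero := by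
  intro valor _
  unfold Spec_conversor_a_numero conversor_a_numero conversor_a_numero_alt
  by_cases h : valor ∈ (["A", "B", "C", "D", "E", "F"] : List String)
  · simp only [List.mem_cons, List.not_mem_nil, or_false] at h
    rcases h with h | h | h | h | h | h <;> subst h <;> decide
  · have h' : ¬(valor = "A" ∨ valor = "B" ∨ valor = "C" ∨ valor = "D" ∨ valor = "E" ∨ valor = "F") := by
      simpa using h
    simp [h']
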